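-- pv_equiv track=rewrite | github.com/memory-eight-way/memory | quiz/make_quiz.py | proc_txt_lv30_39_mask_short_word
-- ===== SOURCE A (Python) =====
-- MASK_CHAR="_"
--
-- FLAG_ANSWER=False
--
-- def is_memory_line(line_info):
--     """
--     記憶対象の行かを確認する
--     行番号. 文章 の構成になっているか
--     """
--     if len(line_info)!=2:
--         # 行番号＋文章の構成でない
--         return False
--
--     if line_info[1].strip()=="":
--         # 行番号＋文章の構成だけど 文章が空
--         return False
--     return True
--
-- def proc_line_mask_short_word (line,lv,slv):
--     """
--     lv30 短い単語をマスクする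
--         lv30 短い単語を1単語以上マスクする
--         lv31 短い単語を2単語以上マスクする
--         lv39 短い単語を10単語以上マスクする
--     """
--
--     di_len=make_len_dict(line)
--     wlenkeys=di_len.keys()
--     wlenkeys=sorted(wlenkeys,reverse=False)
--     wwordcounter=0
--     w_del_count=lv-slv+1
--     w_del_len=0
--     for wchklen in wlenkeys:
--         wwordcounter=wwordcounter+di_len[wchklen]
--         if wwordcounter>=w_del_count:
--             w_del_len=wchklen
--             break
--     #if w_del_len==0:
--     #    return ""
--     w_words=line.split(" ")
--     w_ret=list()
--     for w_word in w_words: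
--         if len(w_word)<=w_del_len:
--             w_ret.append(MASK_CHAR*len(w_word))
--         else:
--             w_ret.append(w_word)
--     return " ".join(w_ret)
--
-- def proc_txt_lv30_39_mask_short_word(lines,lv):
--     w_ret=list()
--
--     wcount=0
--     for line in lines:
--         line_info=line_to_number_body_pair(line)
--         if is_memory_line(line_info):
--             if FLAG_ANSWER:
--                 w_ret.append(line.strip())
--             w_new_line=line_info[0]+" "+proc_line_mask_short_word(line_info[1],lv,30)
--             w_ret.append(w_new_line)
--         else:
--             w_ret.append(line.strip())
--     return w_ret
--
-- def make_len_dict(line):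
--     w_words=line.split(" ")
--     di_len=dict()
--     for wele in w_words:
--         wlen=len(wele)
--         if wlen not in di_len:
--             di_len[wlen]=0
--         di_len[wlen]=di_len[wlen]+1
--     return di_len
--
-- def line_to_number_body_pair(wline):
--     w_word=wline.strip().split(".")
--     w_line_number=w_word[0]+"."
--     w_line_body=".".join(w_word[1:]).strip()
--     return (w_line_number ,w_line_body)
-- ===== SOURCE B (Python) =====
-- MASK_CHAR = "_"
--
-- def _mask_short_words(body, lv):
--     words = body.split(" ")
--     k = lv - 30 + 1
--     if k < 1:
--         k = 1
--     lens = sorted(len(w) for w in words)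
--     thr = lens[k - 1] if k <= len(words) else 0
--     return " ".join(MASK_CHAR * len(w) if len(w) <= thr else w for w in words)
--
-- def proc_txt_lv30_39_mask_short_word(lines, lv):
--     out = []
--     for line in lines:
--         s = line.strip()
--         head, _, tail = s.partition(".")
--         body = tail.strip()
--         if body == "":
--             out.append(s)
--         else:
--             out.append(head + ". " + _mask_short_words(body, lv))
--     return out
-- ===== Notes on version B (the rewrite author's own statement) =====
-- stated objective: simpler
-- what changed: The per-line masker's length-frequency dict, sorted distinct keys and cumulative-count break loop are replaced by sorting the word-length list once and reading the (lv-29)-th smallest length directly as the mask threshold (0 when fewer words than that); line parsing keeps the same split/strip logic inlined without the tuple helper.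
import Mathlib
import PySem

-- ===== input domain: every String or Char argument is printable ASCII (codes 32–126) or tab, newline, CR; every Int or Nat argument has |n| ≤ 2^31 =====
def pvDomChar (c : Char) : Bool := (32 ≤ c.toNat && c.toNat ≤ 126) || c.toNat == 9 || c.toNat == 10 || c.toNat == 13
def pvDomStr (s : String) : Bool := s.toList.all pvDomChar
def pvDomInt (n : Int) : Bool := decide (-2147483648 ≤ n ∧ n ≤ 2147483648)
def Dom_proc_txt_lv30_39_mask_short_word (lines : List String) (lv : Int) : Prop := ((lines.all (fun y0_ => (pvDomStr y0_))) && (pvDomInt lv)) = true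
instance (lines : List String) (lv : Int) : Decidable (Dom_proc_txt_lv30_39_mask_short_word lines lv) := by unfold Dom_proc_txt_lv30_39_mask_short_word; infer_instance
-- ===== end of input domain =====

-- B replaces A's length-frequency dict + sorted-distinct-keys accumulation search by sorting the
-- word-length list once and indexing its (lv-29)-th element; objective: simpler.

-- ===== PORT A =====
-- (ports work on List Char via PySem.Chars, per the PySem convention; String.ofList at the boundary)

def pvFlagAnswer : Bool := false  -- FLAG_ANSWER=False

-- make_len_dict
def pvMakeLenDict (line : List Char) : PySem.Dict Int Int :=
  (PySem.Chars.splitOn line [' ']).foldl (fun di w =>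
    let wlen : Int := (w.length : Int)
    let di := if di.contains wlen then di else di.insert wlen 0
    di.insert wlen (di.getD wlen 0 + 1)) PySem.Dict.empty

-- the 'for wchklen in wlenkeys: … if …: break' loop of proc_line_mask_short_word
def pvFindDelLen : List Int → PySem.Dict Int Int → Int → Int → Int
  | [], _, _, _ => 0
  | k :: ks, di, counter, wdc =>
    let c := counter + di.getD k 0
    if wdc ≤ c then k else pvFindDelLen ks di c wdc

-- proc_line_mask_short_word
def pvProcLineMaskShortWord (line : List Char) (lv slv : Int) : List Char :=
  let di := pvMakeLenDict line
  let wlenkeys := PySem.List.sorted di.keys (fun x => x) false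
  let w_del_count := lv - slv + 1
  let w_del_len := pvFindDelLen wlenkeys di 0 w_del_count
  let w_words := PySem.Chars.splitOn line [' ']
  let w_ret := w_words.foldl (fun acc w =>
    if (w.length : Int) ≤ w_del_len then acc ++ [List.replicate w.length '_'] else acc ++ [w]) []
  PySem.Chars.join [' '] w_ret

-- line_to_number_body_pair  (split(".") is never empty, so w_word[0] is its head)
def pvLineToNumberBodyPair (wline : List Char) : List Char × List Char :=
  let w_word := PySem.Chars.splitOn (PySem.Chars.strip wline) ['.']
  (w_word.headD [] ++ ['.'], PySem.Chars.strip (PySem.Chars.join ['.'] (w_word.drop 1)))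

-- is_memory_line  (line_info is a pair, so the len(line_info)!=2 check never fires)
def pvIsMemoryLine (li : List Char × List Char) : Bool :=
  if PySem.Chars.strip li.2 = [] then false else true

def proc_txt_lv30_39_mask_short_word (lines : List String) (lv : Int) : List String :=
  (lines.foldl (fun w_ret line =>
    let li := pvLineToNumberBodyPair line.toList
    if pvIsMemoryLine li then
      let w_ret := if pvFlagAnswer then w_ret ++ [PySem.Chars.strip line.toList] else w_ret
      w_ret ++ [li.1 ++ [' '] ++ pvProcLineMaskShortWord li.2 lv 30]
    else
      w_ret ++ [PySem.Chars.strip line.toList]) []).map String.ofList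

-- ===== PORT B =====

-- _mask_short_words of Source B: sort all word lengths, threshold = k-th smallest (k = lv-29, at least 1)
def pvMaskShortWordsB (body : List Char) (lv : Int) : List Char :=
  let words := PySem.Chars.splitOn body [' ']
  let k0 : Int := lv - 30 + 1
  let k : Int := if k0 < 1 then 1 else k0
  let lens := PySem.List.sorted (words.map (fun w => (w.length : Int))) (fun x => x) false
  let thr : Int := if k ≤ (words.length : Int) then (PySem.List.pyGet? lens (k - 1)).getD 0 else 0
  PySem.Chars.join [' '] (words.map (fun w => if (w.length : Int) ≤ thr then List.replicate w.length '_' else w))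

def proc_txt_lv30_39_mask_short_word_alt (lines : List String) (lv : Int) : List String :=
  lines.map (fun line =>
    let s := PySem.Chars.strip line.toList
    let parts := PySem.Chars.splitOn s ['.']
    let body := PySem.Chars.strip (PySem.Chars.join ['.'] (parts.drop 1))
    String.ofList (if body = [] then s
                   else parts.headD [] ++ ('.' :: ' ' :: pvMaskShortWordsB body lv)))

-- ===== PRECONDITION & SPEC =====
def Spec_proc_txt_lv30_39_mask_short_word (lines : List String) (lv : Int) (out : List String) : Prop := out = proc_txt_lv30_39_mask_short_word_alt lines lv
instance (lines : List String) (lv : Int) (out : List String) : Decidable (Spec_proc_txt_lv30_39_mask_short_word lines lv out) := by unfold Spec_proc_txt_lv30_39_mask_short_word; infer_instance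

-- ===== CLAIM (what is proved, stated in full; the proofs are below) =====
def Claim_equal_proc_txt_lv30_39_mask_short_word : Prop := ∀ (lines : List String) (lv : Int), Dom_proc_txt_lv30_39_mask_short_word lines lv → Spec_proc_txt_lv30_39_mask_short_word lines lv (proc_txt_lv30_39_mask_short_word lines lv)

-- ===== LEMMAS AND PROOFS =====

-- dropWhile is idempotent
lemma pv_dropWhile_dropWhile (p : Char → Bool) (l : List Char) :
    List.dropWhile p (List.dropWhile p l) = List.dropWhile p l := by
  induction l with
  | nil => simp
  | cons a t ih =>
    by_cases h : p a = true
    · simpa [List.dropWhile, h] using ih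
    · simp [List.dropWhile, h]

lemma pv_lstrip_lstrip (s : List Char) :
    PySem.Chars.lstrip (PySem.Chars.lstrip s) = PySem.Chars.lstrip s := by
  simp [PySem.Chars.lstrip, pv_dropWhile_dropWhile]

lemma pv_rstrip_rstrip (s : List Char) :
    PySem.Chars.rstrip (PySem.Chars.rstrip s) = PySem.Chars.rstrip s := by
  simp [PySem.Chars.rstrip, pv_dropWhile_dropWhile]

-- lstrip of a string with a non-space head (or empty) is itself
lemma pv_lstrip_rstrip_lstrip (s : List Char) :
    PySem.Chars.lstrip (PySem.Chars.rstrip (PySem.Chars.lstrip s)) =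
      PySem.Chars.rstrip (PySem.Chars.lstrip s) := by
  have hy : List.dropWhile PySem.Chars.isspace (PySem.Chars.lstrip s) = PySem.Chars.lstrip s :=
    pv_lstrip_lstrip s
  simp only [PySem.Chars.lstrip, PySem.Chars.rstrip] at *
  set y := List.dropWhile PySem.Chars.isspace s with hydef
  cases h : (List.dropWhile PySem.Chars.isspace y.reverse).reverse with
  | nil => simp [h]
  | cons a t =>
    have hpre : a :: t <+: y := by
      rw [← h]
      have hsuf : List.dropWhile PySem.Chars.isspace y.reverse <:+ y.reverse :=
        List.dropWhile_suffix _
      have := hsuf.reverse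
      simpa using this
    obtain ⟨rest, hrest⟩ := hpre
    have hpa : PySem.Chars.isspace a = false := by
      by_contra hcon
      have hpa' : PySem.Chars.isspace a = true := by
        cases hb : PySem.Chars.isspace a
        · exact absurd hb hcon
        · rfl
      rw [← hrest, List.cons_append, List.dropWhile_cons_of_pos hpa'] at hy
      have h1 : (List.dropWhile PySem.Chars.isspace (t ++ rest)).length ≤ (t ++ rest).length :=
        List.length_dropWhile_le _ _
      rw [hy] at h1
      simp [List.length_append] at h1
    rw [List.dropWhile_cons_of_neg (by simp [hpa])]

lemma pv_strip_strip (s : List Char) :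
    PySem.Chars.strip (PySem.Chars.strip s) = PySem.Chars.strip s := by
  simp only [PySem.Chars.strip]
  rw [pv_lstrip_rstrip_lstrip, pv_rstrip_rstrip]

-- counting: elements < d plus copies of d = elements ≤ d   (Int lists)
lemma pv_countP_lt_add_count (L : List Int) (d : Int) :
    L.countP (fun x => decide (x < d)) + L.count d = L.countP (fun x => decide (x ≤ d)) := by
  induction L with
  | nil => simp
  | cons a t ih =>
    by_cases h : a = d
    · subst h; simp [List.countP_cons]; omega
    · by_cases h2 : a < d
      · simp [h, h2, le_of_lt h2]; omega
      · have h3 : ¬ a ≤ d := fun hle => h (le_antisymm hle (not_lt.mp h2))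
        simp [h, h2, h3, ih]

-- in a ≤-sorted list, positions from countP(<d) up to countP(≤d) hold d
lemma pv_getElem_of_countP (s : List Int) (hs : s.Pairwise (· ≤ ·)) (d : Int) (i : Nat)
    (hi : i < s.length)
    (h1 : s.countP (fun x => decide (x < d)) ≤ i)
    (h2 : i < s.countP (fun x => decide (x ≤ d))) : s[i] = d := by
  induction s generalizing i with
  | nil => simp at hi
  | cons a t ih =>
    have hat : ∀ x ∈ t, a ≤ x := (List.pairwise_cons.mp hs).1
    have hpt : t.Pairwise (· ≤ ·) := (List.pairwise_cons.mp hs).2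
    rcases lt_trichotomy a d with hlt | heq | hgt
    · -- a < d
      cases i with
      | zero => simp [List.countP_cons, hlt] at h1
      | succ j =>
        have := ih hpt j (by simpa using hi)
          (by simp [hlt] at h1; omega)
          (by simp [le_of_lt hlt] at h2; omega)
        simpa using this
    · subst heq
      have ht0 : t.countP (fun x => decide (x < a)) = 0 := by
        rw [List.countP_eq_zero]
        intro x hx
        simp only [decide_eq_true_eq]
        exact not_lt.mpr (hat x hx)
      cases i with
      | zero => simp
      | succ j =>
        have := ih hpt j (by simpa using hi)
          (by omega)
          (by simp at h2; omega)
        simpa using this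
    · -- d < a : nothing is ≤ d
      have h0 : (a :: t).countP (fun x => decide (x ≤ d)) = 0 := by
        rw [List.countP_eq_zero]
        intro x hx
        simp only [decide_eq_true_eq]
        rcases List.mem_cons.mp hx with rfl | hx
        · omega
        · have := hat x hx; omega
      omega

-- replacing the cutoff wdc by max wdc 1 does not change the loop (counts are ≥ 1)
lemma pv_findDelLen_max (ds : List Int) (di : PySem.Dict Int Int) (c wdc : Int)
    (h : ∀ d ∈ ds, 1 ≤ di.getD d 0) (hc : 0 ≤ c) :
    pvFindDelLen ds di c wdc = pvFindDelLen ds di c (max wdc 1) := by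
  induction ds generalizing c with
  | nil => rfl
  | cons d ds ih =>
    have hd : 1 ≤ di.getD d 0 := h d (by simp)
    simp only [pvFindDelLen]
    have : (wdc ≤ c + di.getD d 0) ↔ (max wdc 1 ≤ c + di.getD d 0) := by omega
    by_cases hbr : wdc ≤ c + di.getD d 0
    · rw [if_pos hbr, if_pos (this.mp hbr)]
    · rw [if_neg hbr, if_neg (fun hx => hbr (this.mpr hx))]
      exact ih (c + di.getD d 0) (fun x hx => h x (List.mem_cons_of_mem _ hx)) (by omega)

-- the core: the break-loop over the sorted distinct values computes the k-th smallest
lemma pv_findDelLen_spec (L : List Int) (k : Int) (hk : 1 ≤ k) :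
    ∀ (ds : List Int) (di : PySem.Dict Int Int) (c : Int),
    (∀ d ∈ ds, di.getD d 0 = (L.count d : Int)) →
    ds.Pairwise (· < ·) →
    (∀ d ∈ ds, d ∈ L) →
    c = (L.countP (fun x => decide (∀ d ∈ ds, x < d)) : Int) →
    (∀ x ∈ L, x ∉ ds → ∀ d ∈ ds, x < d) →
    c < k →
    pvFindDelLen ds di c k =
      (if k ≤ (L.length : Int)
       then (PySem.List.sorted L (fun x => x) false).getD (k - 1).toNat 0 else 0) := by
  intro ds
  induction ds with
  | nil =>
    intro di c _ _ _ hcnt _ hck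
    have : L.countP (fun x => decide (∀ d ∈ ([] : List Int), x < d)) = L.length := by
      rw [List.countP_eq_length]; intro a _; simp
    rw [this] at hcnt
    rw [if_neg (by omega)]
    rfl
  | cons d ds ih =>
    intro di c hdi hpw hmem hcnt hbelow hck
    have hdlt : ∀ d' ∈ ds, d < d' := (List.pairwise_cons.mp hpw).1
    have hpw' : ds.Pairwise (· < ·) := (List.pairwise_cons.mp hpw).2
    have hdL : d ∈ L := hmem d (List.mem_cons_self)
    have hgetD : di.getD d 0 = (L.count d : Int) := hdi d (List.mem_cons_self)
    have hcpos : 0 < L.count d := List.count_pos_iff.mpr hdL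
    have hc_lt : c = (L.countP (fun x => decide (x < d)) : Int) := by
      rw [hcnt]
      congr 1
      apply List.countP_congr
      intro x hx
      simp only [List.mem_cons, decide_eq_true_eq]
      constructor
      · intro hall
        exact hall d (Or.inl rfl)
      · intro hxd d' hd'
        rcases hd' with rfl | hd'
        · exact hxd
        · exact lt_trans hxd (hdlt d' hd')
    have hc'_eq : c + di.getD d 0 = (L.countP (fun x => decide (x ≤ d)) : Int) := by
      rw [hc_lt, hgetD, ← pv_countP_lt_add_count L d]
      push_cast
      ring
    simp only [pvFindDelLen]
    by_cases hbr : k ≤ c + di.getD d 0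
    · rw [if_pos hbr]
      have hcle : L.countP (fun x => decide (x ≤ d)) ≤ L.length := List.countP_le_length
      have hkle : k ≤ (L.length : Int) := by omega
      rw [if_pos hkle]
      have hperm := PySem.List.sorted_perm L (fun x => x) false
      have hpws : (PySem.List.sorted L (fun x => x) false).Pairwise (· ≤ ·) := by
        have := PySem.List.sorted_pairwise L (fun x => x)
        simpa using this
      set s := PySem.List.sorted L (fun x => x) false with hs
      have hlen_s : s.length = L.length := hperm.length_eq
      have hc1 : s.countP (fun x => decide (x < d)) = L.countP (fun x => decide (x < d)) :=
        hperm.countP_eq _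
      have hc2 : s.countP (fun x => decide (x ≤ d)) = L.countP (fun x => decide (x ≤ d)) :=
        hperm.countP_eq _
      have hi : (k - 1).toNat < s.length := by omega
      have hval := pv_getElem_of_countP s hpws d (k - 1).toNat hi (by omega) (by omega)
      rw [List.getD_eq_getElem?_getD, List.getElem?_eq_getElem hi]
      simpa using hval.symm
    · rw [if_neg hbr]
      apply ih di (c + di.getD d 0)
        (fun x hx => hdi x (List.mem_cons_of_mem _ hx))
        hpw'
        (fun x hx => hmem x (List.mem_cons_of_mem _ hx))
        ?_ ?_ (by omega)
      · rw [hc'_eq]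
        congr 1
        apply List.countP_congr
        intro x hx
        simp only [decide_eq_true_eq]
        constructor
        · intro hxd d' hd'
          exact lt_of_le_of_lt hxd (hdlt d' hd')
        · intro hall
          by_contra hgt
          have hdx : d < x := lt_of_not_ge hgt
          by_cases hxds : x ∈ ds
          · exact absurd (hall x hxds) (lt_irrefl x)
          · have hx' : x ∉ d :: ds := by
              simp only [List.mem_cons, not_or]
              exact ⟨by omega, hxds⟩
            have := hbelow x hx hx' d (List.mem_cons_self)
            omega
      · intro x hx hxds d' hd'
        by_cases hxd : x = d
        · subst hxd
          exact hdlt d' hd'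
        · exact hbelow x hx (by simp [hxd, hxds]) d' (List.mem_cons_of_mem _ hd')

-- A's dict-building loop is Counter(lengths)
lemma pv_makeLenDict_eq_counter (line : List Char) :
    pvMakeLenDict line =
      PySem.Dict.counter ((PySem.Chars.splitOn line [' ']).map (fun w => (w.length : Int))) := by
  unfold pvMakeLenDict
  rw [← PySem.Dict.foldl_insert_getD_add_one_eq_counter, List.foldl_map]
  congr 1
  funext di w
  by_cases h : di.contains (w.length : Int) = true
  · simp [h]
  · simp only [h, Bool.false_eq_true, if_false]
    rw [PySem.Dict.getD_insert_self, PySem.Dict.insert_insert_self,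
        PySem.Dict.getD_of_not_contains _ _ (by simpa using h)]

-- the two per-line maskers agree
lemma pv_mask_eq (body : List Char) (lv : Int) :
    pvProcLineMaskShortWord body lv 30 = pvMaskShortWordsB body lv := by
  have hdict := pv_makeLenDict_eq_counter body
  simp only [pvProcLineMaskShortWord, pvMaskShortWordsB, hdict]
  set words := PySem.Chars.splitOn body [' '] with hwords
  set L := words.map (fun w => (w.length : Int)) with hL
  have hlenL : L.length = words.length := by simp [hL]
  set wdc : Int := lv - 30 + 1 with hwdc
  set k : Int := max wdc 1 with hk
  set ds0 := PySem.List.sorted (PySem.Set.ofList L) (fun x => x) false with hds0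
  have hmemds : ∀ x, x ∈ ds0 ↔ x ∈ L := fun x => by
    rw [hds0, PySem.List.mem_sorted, PySem.Set.mem_ofList]
  -- A's threshold
  have hA : pvFindDelLen (PySem.List.sorted (PySem.Dict.counter L).keys (fun x => x) false)
      (PySem.Dict.counter L) 0 wdc
      = (if k ≤ (L.length : Int)
         then (PySem.List.sorted L (fun x => x) false).getD (k - 1).toNat 0 else 0) := by
    rw [PySem.Dict.keys_counter]
    rw [pv_findDelLen_max _ _ _ _ ?_ le_rfl]
    · rw [← hds0, ← hk]
      apply pv_findDelLen_spec L k (le_max_right _ _) ds0 (PySem.Dict.counter L) 0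
      · intro x _
        exact PySem.Dict.getD_counter L x
      · exact PySem.List.sorted_ofList_pairwise_lt L
      · intro x hx
        exact (hmemds x).mp hx
      · symm
        have : L.countP (fun x => decide (∀ d ∈ ds0, x < d)) = 0 := by
          rw [List.countP_eq_zero]
          intro x hx
          simp only [decide_eq_true_eq, not_forall]
          exact ⟨x, (hmemds x).mpr hx, lt_irrefl x⟩
        simp [this]
      · intro x hx hnot
        exact absurd ((hmemds x).mpr hx) hnot
      · omega
    · intro x hx
      rw [PySem.Dict.getD_counter]
      have hxL : x ∈ L := (hmemds x).mp hx
      have := List.count_pos_iff.mpr hxL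
      omega
  have h1k : (1 : Int) ≤ k := le_max_right _ _
  have hkite : (if wdc < 1 then (1 : Int) else wdc) = k := by
    rw [hk]; split_ifs <;> omega
  have h2 : k - 1 = (((k - 1).toNat : Nat) : Int) := (Int.toNat_of_nonneg (by omega)).symm
  have hloop : ∀ (t : Int),
      words.foldl (fun acc w =>
        if (w.length : Int) ≤ t then acc ++ [List.replicate w.length '_'] else acc ++ [w]) []
      = words.map (fun w => if (w.length : Int) ≤ t then List.replicate w.length '_' else w) := by
    intro t
    have hfun : (fun (acc : List (List Char)) (w : List Char) =>
        if (w.length : Int) ≤ t then acc ++ [List.replicate w.length '_'] else acc ++ [w])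
        = fun acc w => acc ++ [if (w.length : Int) ≤ t then List.replicate w.length '_' else w] := by
      funext acc w
      split_ifs <;> rfl
    rw [hfun, PySem.List.foldl_append_singleton_eq_map, List.nil_append]
  rw [hA, hkite, ← hlenL, h2, PySem.List.pyGet?_natCast, List.getD_eq_getElem?_getD, hloop]
  simp

-- the per-line output of A's loop
def pvLineOut (lv : Int) (line : String) : List Char :=
  let li := pvLineToNumberBodyPair line.toList
  if pvIsMemoryLine li then li.1 ++ [' '] ++ pvProcLineMaskShortWord li.2 lv 30
  else PySem.Chars.strip line.toList

lemma pv_foldl_lines (lv : Int) (lines : List String) (acc : List (List Char)) :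
    lines.foldl (fun w_ret line =>
      let li := pvLineToNumberBodyPair line.toList
      if pvIsMemoryLine li then
        let w_ret := if pvFlagAnswer then w_ret ++ [PySem.Chars.strip line.toList] else w_ret
        w_ret ++ [li.1 ++ [' '] ++ pvProcLineMaskShortWord li.2 lv 30]
      else
        w_ret ++ [PySem.Chars.strip line.toList]) acc
    = acc ++ lines.map (pvLineOut lv) := by
  have hfun : (fun (w_ret : List (List Char)) (line : String) =>
      let li := pvLineToNumberBodyPair line.toList
      if pvIsMemoryLine li then
        let w_ret := if pvFlagAnswer then w_ret ++ [PySem.Chars.strip line.toList] else w_ret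
        w_ret ++ [li.1 ++ [' '] ++ pvProcLineMaskShortWord li.2 lv 30]
      else
        w_ret ++ [PySem.Chars.strip line.toList])
      = fun w_ret line => w_ret ++ [pvLineOut lv line] := by
    funext w_ret line
    simp only [pvLineOut, pvFlagAnswer, Bool.false_eq_true, if_false]
    split_ifs <;> rfl
  rw [hfun, PySem.List.foldl_append_singleton_eq_map]

set_option maxHeartbeats 1000000 in
lemma pv_line_eq (lv : Int) (line : String) :
    String.ofList (pvLineOut lv line)
    = (let s := PySem.Chars.strip line.toList
       let parts := PySem.Chars.splitOn s ['.']
       let body := PySem.Chars.strip (PySem.Chars.join ['.'] (parts.drop 1))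
       String.ofList (if body = [] then s
                      else parts.headD [] ++ ('.' :: ' ' :: pvMaskShortWordsB body lv))) := by
  simp only [pvLineOut, pvLineToNumberBodyPair, pvIsMemoryLine]
  simp only [pv_strip_strip]
  by_cases h : PySem.Chars.strip
      (PySem.Chars.join ['.'] ((PySem.Chars.splitOn (PySem.Chars.strip line.toList) ['.']).tail)) = []
  · simp [h]
  · simp [h, pv_mask_eq]

-- ===== VERDICT (by name: the statement is the Claim_ definition above) =====
theorem proc_txt_lv30_39_mask_short_word_spec : Claim_equal_proc_txt_lv30_39_mask_short_word := by
  intro lines lv _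
  unfold Spec_proc_txt_lv30_39_mask_short_word
  unfold proc_txt_lv30_39_mask_short_word proc_txt_lv30_39_mask_short_word_alt
  rw [pv_foldl_lines, List.nil_append, List.map_map]
  apply List.map_congr_left
  intro line _
  exact pv_line_eq lv line
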